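-- pv_equiv track=rewrite | github.com/niteeshaiml1/Python_Programs | revision/first_dig_prime.py | first_dig_prime
-- ===== SOURCE A (Python) =====
-- def first_dig_prime(num):
--     temp=num
--     ip=0
--     while temp>0:
--         dig=temp%10
--         temp//=10
--     ip=dig
--     for i in range (2,ip):
--         if ip%i==0:
--             return False
--     return True
-- ===== SOURCE B (Python) =====
-- def first_dig_prime(num):
--     d = num
--     while d >= 10:
--         d //= 10
--     i = 2
--     while i * i <= d:
--         if d % i == 0:
--             return False
--         i += 1
--     return True
-- ===== Notes on version B (the rewrite author's own statement) =====
-- stated objective: simpler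
-- what changed: B strips digits in place (while d>=10: d//=10) instead of tracking a separate temp/dig pair, and replaces the range(2,ip) trial division with a sqrt-bounded while loop (i*i<=d), dropping the unused ip=0 initialisation.
-- outside the precondition, e.g. on first_dig_prime(0): A raises UnboundLocalError, B returns True
import Mathlib
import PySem

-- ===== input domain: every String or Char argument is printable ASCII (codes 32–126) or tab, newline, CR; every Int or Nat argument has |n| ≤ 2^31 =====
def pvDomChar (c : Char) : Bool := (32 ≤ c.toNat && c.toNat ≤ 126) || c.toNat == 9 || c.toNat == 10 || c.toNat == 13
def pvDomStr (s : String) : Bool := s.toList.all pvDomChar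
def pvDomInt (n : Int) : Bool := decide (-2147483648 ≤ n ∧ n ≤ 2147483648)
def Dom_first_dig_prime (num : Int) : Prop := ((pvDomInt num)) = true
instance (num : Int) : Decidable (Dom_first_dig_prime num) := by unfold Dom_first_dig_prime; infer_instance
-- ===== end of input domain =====

-- B strips digits in place and uses a sqrt-bounded trial division instead of A's temp/dig
-- pair and range(2, ip) loop; same return value wherever A returns (num ≥ 1).

-- ===== PORT A =====
-- while temp>0: dig=temp%10; temp//=10  — 'some dig' = dig has been assigned
def digLoopA (temp : Int) (dig : Option Int) : Option Int :=
  if temp > 0 then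
    digLoopA (PySem.Int.floordiv temp 10) (some (PySem.Int.mod temp 10))
  else dig
termination_by temp.toNat
decreasing_by
  have h : PySem.Int.floordiv temp 10 = temp / 10 :=
    PySem.Int.floordiv_eq_ediv_of_pos (by omega)
  rw [h]; omega

-- for i in range(2, ip): if ip%i==0: return False
def trialA (ip : Int) : List Int → Bool
  | [] => true
  | i :: rest => if PySem.Int.mod ip i == 0 then false else trialA ip rest

def first_dig_prime (num : Int) : Bool :=
  match digLoopA num none with
  | some ip => trialA ip (PySem.List.pyRange 2 ip 1)
  | none => false   -- Python raises UnboundLocalError here (num ≤ 0); excluded by Pre_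

-- ===== PORT B =====
-- while d >= 10: d //= 10
def digB (d : Int) : Int :=
  if d ≥ 10 then digB (PySem.Int.floordiv d 10) else d
termination_by d.toNat
decreasing_by
  have h : PySem.Int.floordiv d 10 = d / 10 :=
    PySem.Int.floordiv_eq_ediv_of_pos (by omega)
  rw [h]; omega

-- while i*i <= d: if d % i == 0: return False; i += 1
def trialB (i d : Int) : Bool :=
  if i * i ≤ d then
    (if PySem.Int.mod d i == 0 then false else trialB (i + 1) d)
  else true
termination_by (d + 1 - i).toNat
decreasing_by
  have hid : i ≤ d := by
    by_cases h0 : i ≤ 0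
    · nlinarith [mul_self_nonneg i]
    · nlinarith
  omega

def first_dig_prime_alt (num : Int) : Bool :=
  trialB 2 (digB num)

-- ===== PRECONDITION & SPEC =====
-- Python A raises UnboundLocalError ('dig' never assigned) for num ≤ 0.
def Pre_first_dig_prime (num : Int) : Prop := 1 ≤ num
instance (num : Int) : Decidable (Pre_first_dig_prime num) := by
  unfold Pre_first_dig_prime; infer_instance

def pvWitness_first_dig_prime : Int := (7)

def Spec_first_dig_prime (num : Int) (out : Bool) : Prop := out = first_dig_prime_alt num
instance (num : Int) (out : Bool) : Decidable (Spec_first_dig_prime num out) := by unfold Spec_first_dig_prime; infer_instance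

-- ===== CLAIM (what is proved, stated in full; the proofs are below) =====
def Claim_equal_first_dig_prime : Prop := ∀ (num : Int), Dom_first_dig_prime num → Pre_first_dig_prime num → Spec_first_dig_prime num (first_dig_prime num)

-- ===== LEMMAS AND PROOFS =====

-- B's digit loop lands in 1..9 for positive input
theorem digB_range (n : Int) (h : 1 ≤ n) : 1 ≤ digB n ∧ digB n ≤ 9 := by
  have H : ∀ k : Nat, ∀ n : Int, n.toNat ≤ k → 1 ≤ n → 1 ≤ digB n ∧ digB n ≤ 9 := by
    intro k
    induction k with
    | zero => intro n hk h1; omega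
    | succ k ih =>
      intro n hk h1
      rw [digB]
      split_ifs with h10
      · have he : PySem.Int.floordiv n 10 = n / 10 :=
          PySem.Int.floordiv_eq_ediv_of_pos (by omega)
        rw [he]
        exact ih (n / 10) (by omega) (by omega)
      · omega
  exact H n.toNat n le_rfl h

-- A's temp/dig loop computes the same leading digit as B's in-place loop
theorem digLoopA_eq_digB (n : Int) (h : 1 ≤ n) (dig : Option Int) :
    digLoopA n dig = some (digB n) := by
  have H : ∀ k : Nat, ∀ n : Int, n.toNat ≤ k → 1 ≤ n → ∀ dig : Option Int,
      digLoopA n dig = some (digB n) := by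
    intro k
    induction k with
    | zero => intro n hk h1; omega
    | succ k ih =>
      intro n hk h1 dig
      rw [digLoopA]
      have he : PySem.Int.floordiv n 10 = n / 10 :=
        PySem.Int.floordiv_eq_ediv_of_pos (by omega)
      have hm : PySem.Int.mod n 10 = n % 10 :=
        PySem.Int.mod_eq_emod_of_pos (by omega)
      simp only [if_pos (by omega : n > 0), he, hm]
      by_cases h10 : n ≥ 10
      · rw [ih (n / 10) (by omega) (by omega)]
        conv_rhs => rw [digB]
        rw [if_pos h10, he]
      · have h0 : n / 10 = 0 := by omega
        rw [h0, digLoopA]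
        have hn : n % 10 = n := by omega
        rw [if_neg (by omega : ¬ (0 : Int) > 0), hn]
        conv_rhs => rw [digB]
        rw [if_neg h10]
  exact H n.toNat n le_rfl h dig

-- on the nine possible leading digits the two primality loops agree
theorem trial_eq (ip : Int) (h1 : 1 ≤ ip) (h2 : ip ≤ 9) :
    trialA ip (PySem.List.pyRange 2 ip 1) = trialB 2 ip := by
  interval_cases ip <;>
    · rw [trialB]; norm_num [trialA, PySem.Int.mod]
      repeat (first | rfl | (rw [trialB]; norm_num [PySem.Int.mod]))

-- ===== VERDICT (by name: the statement is the Claim_ definition above) =====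
theorem first_dig_prime_spec : Claim_equal_first_dig_prime := by
  intro num _ hpre
  unfold Spec_first_dig_prime first_dig_prime first_dig_prime_alt
  rw [digLoopA_eq_digB num hpre none]
  obtain ⟨hl, hr⟩ := digB_range num hpre
  exact trial_eq (digB num) hl hr
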